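-- pv_equiv track=rewrite | github.com/replit/upm | internal/backends/python/regression_tests/test.py | choose_module
-- ===== SOURCE A (Python) =====
-- def choose_module(pkg, modules):
--     best_score = 0
--     choosen = None
--     for mod in modules:
--         if mod == pkg:
--             return mod
--         if mod.startswith("_"):
--             score = 1
--         else:
--             score = 2
--         if score > best_score:
--             best_score = score
--             choosen = mod
--     return choosen
-- ===== SOURCE B (Python) =====
-- def choose_module(pkg, modules):
--     mods = list(modules)
--     if pkg in mods:
--         return pkg
--     for mod in mods:
--         if not mod.startswith("_"):
--             return mod
--     return mods[0] if mods else None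
-- ===== Notes on version B (the rewrite author's own statement) =====
-- stated objective: simpler
-- what changed: Replaced the score/best-score accumulator loop by phased scans: membership test for pkg, then first non-underscore module, then first module.
import Mathlib
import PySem

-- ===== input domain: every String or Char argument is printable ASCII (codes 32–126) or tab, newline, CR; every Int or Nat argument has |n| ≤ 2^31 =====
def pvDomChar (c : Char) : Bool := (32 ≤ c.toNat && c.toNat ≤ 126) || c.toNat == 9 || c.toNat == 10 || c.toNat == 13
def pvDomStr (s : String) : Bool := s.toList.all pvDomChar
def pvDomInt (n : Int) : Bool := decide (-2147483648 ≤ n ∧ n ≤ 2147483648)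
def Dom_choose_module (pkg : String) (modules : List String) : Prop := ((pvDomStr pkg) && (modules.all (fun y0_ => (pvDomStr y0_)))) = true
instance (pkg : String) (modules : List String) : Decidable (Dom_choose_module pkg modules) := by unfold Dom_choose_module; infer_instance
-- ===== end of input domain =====

-- B replaces A's score/best-score accumulator loop by phased scans (membership, first
-- non-underscore, first element); objective: simpler.


-- ===== PORT A =====
-- literal port of A's loop: state (best_score, choosen), early return on mod == pkg
def choose_module_go (pkg : String) (modules : List String)
    (best_score : Int) (choosen : Option String) : Option String :=
  match modules with
  | [] => choosen
  | mod :: rest =>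
    if mod == pkg then some mod
    else
      let score : Int := if PySem.Str.startswith mod "_" then 1 else 2
      if score > best_score then choose_module_go pkg rest score (some mod)
      else choose_module_go pkg rest best_score choosen

def choose_module (pkg : String) (modules : List String) : Option String :=
  choose_module_go pkg modules 0 none

-- ===== PORT B =====
def choose_module_alt (pkg : String) (modules : List String) : Option String :=
  if modules.contains pkg then some pkg
  else
    match modules.find? (fun m => !(PySem.Str.startswith m "_")) with
    | some m => some m
    | none => modules.head?

-- ===== PRECONDITION & SPEC =====
def Spec_choose_module (pkg : String) (modules : List String) (out : Option String) : Prop := out = choose_module_alt pkg modules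
instance (pkg : String) (modules : List String) (out : Option String) : Decidable (Spec_choose_module pkg modules out) := by unfold Spec_choose_module; infer_instance

-- ===== CLAIM (what is proved, stated in full; the proofs are below) =====
def Claim_equal_choose_module : Prop := ∀ (pkg : String) (modules : List String), Dom_choose_module pkg modules → Spec_choose_module pkg modules (choose_module pkg modules)

-- ===== LEMMAS AND PROOFS =====

-- once best_score = 2, nothing beats it: the loop only looks for pkg
theorem choose_module_go_two (pkg : String) (l : List String) (m : String) :
    choose_module_go pkg l 2 (some m) = if l.contains pkg then some pkg else some m := by
  induction l with
  | nil => simp [choose_module_go]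
  | cons x rest ih =>
    by_cases hx : x = pkg
    · subst hx; simp [choose_module_go]
    · simp only [choose_module_go, beq_iff_eq, hx, if_false]
      have hx' : ¬pkg = x := fun h => hx h.symm
      by_cases hu : PySem.Chars.startswith x.toList ['_']
      <;> simp [PySem.Str.startswith, hu, ih, hx']

-- with best_score = 1, an underscore module keeps the state, a plain one jumps to 2
theorem choose_module_go_one (pkg : String) (l : List String) (m : String) :
    choose_module_go pkg l 1 (some m) =
      if l.contains pkg then some pkg
      else match l.find? (fun x => !(PySem.Str.startswith x "_")) with
           | some x => some x
           | none => some m := by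
  induction l with
  | nil => simp [choose_module_go]
  | cons x rest ih =>
    by_cases hx : x = pkg
    · subst hx; simp [choose_module_go]
    · simp only [choose_module_go, beq_iff_eq, hx, if_false]
      have hx' : ¬pkg = x := fun h => hx h.symm
      by_cases hu : PySem.Chars.startswith x.toList ['_']
      · simp [PySem.Str.startswith, hu, ih, hx', List.find?_cons]
      · simp [PySem.Str.startswith, hu, choose_module_go_two, hx', List.find?_cons]

-- ===== VERDICT (by name: the statement is the Claim_ definition above) =====
theorem choose_module_spec : Claim_equal_choose_module := by
  intro pkg modules _
  unfold Spec_choose_module choose_module choose_module_alt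
  cases modules with
  | nil => simp [choose_module_go]
  | cons x rest =>
    by_cases hx : x = pkg
    · subst hx; simp [choose_module_go]
    · simp only [choose_module_go, beq_iff_eq, hx, if_false]
      have hx' : ¬pkg = x := fun h => hx h.symm
      by_cases hu : PySem.Chars.startswith x.toList ['_']
      · simp [PySem.Str.startswith, hu, choose_module_go_one, hx', List.find?_cons]
      · simp [PySem.Str.startswith, hu, choose_module_go_two, hx', List.find?_cons]
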